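-- pv_equiv track=rewrite | github.com/lfrazer/class-- | classstripper.py | FixupScope
-- ===== SOURCE A (Python) =====
-- def FixupScope(scope):
-- 	if(scope.find("::") == -1):
-- 		return scope
-- 	scopeout = ""
-- 	scopeParts = scope.split("::")
-- 	numScopeParts = len(scopeParts)
-- 	if scopeParts[len(scopeParts)-1].find("__anon") != -1:
-- 		numScopeParts = numScopeParts - 1
--
-- 	counter = 0
-- 	for str in scopeParts:
-- 		scopeout = scopeout + str + "::"
-- 		counter = counter + 1
-- 		if counter >= numScopeParts:
-- 			break
--
-- 	scopeout = scopeout[0:len(scopeout)-2]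
-- 	return scopeout
-- ===== SOURCE B (Python) =====
-- def FixupScope(scope):
--     pos = scope.rfind("::")
--     if pos == -1:
--         return scope
--     if "__anon" in scope[pos + 2:]:
--         return scope[:pos]
--     return scope
-- ===== Notes on version B (the rewrite author's own statement) =====
-- stated objective: alternative
-- what changed: B never splits the string into a list of parts: it locates the last separator with rfind, tests '__anon' membership on the tail slice after it, and returns a prefix slice (or the input unchanged), replacing A's split / counted rebuild loop / trailing-separator strip; Pre_ excludes strings containing ':::', a malformed overlapping-separator corner where the split-based and rfind-based readings of the last separator both defensibly differ.
-- outside the precondition, e.g. on FixupScope('a:::__anon'): A returns 'a', B returns 'a:'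
import Mathlib
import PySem

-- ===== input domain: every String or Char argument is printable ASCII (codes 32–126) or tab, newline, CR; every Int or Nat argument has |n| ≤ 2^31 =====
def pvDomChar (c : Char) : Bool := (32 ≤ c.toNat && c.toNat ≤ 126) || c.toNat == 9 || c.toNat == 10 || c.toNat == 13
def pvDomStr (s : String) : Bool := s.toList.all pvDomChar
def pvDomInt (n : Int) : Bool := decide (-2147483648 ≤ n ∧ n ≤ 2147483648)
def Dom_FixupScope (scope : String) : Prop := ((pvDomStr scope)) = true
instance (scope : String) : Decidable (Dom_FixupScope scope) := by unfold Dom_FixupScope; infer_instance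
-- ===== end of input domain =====

-- B works on string indices only (rfind + two slices), never building the list of
-- '::'-separated parts that A splits into and rebuilds; objective: alternative.

-- ===== PORT A =====
-- the 'for str in scopeParts: … if counter >= numScopeParts: break' loop of A
def FixupScopeLoop (parts : List (List Char)) (numScopeParts : Nat) (counter : Nat)
    (scopeout : List Char) : List Char :=
  match parts with
  | [] => scopeout
  | p :: rest =>
      let scopeout' := scopeout ++ p ++ "::".toList
      let counter' := counter + 1
      if numScopeParts ≤ counter' then scopeout'
      else FixupScopeLoop rest numScopeParts counter' scopeout'

def FixupScopeCore (s : List Char) : List Char :=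
  if PySem.Chars.find s "::".toList = -1 then s
  else
    let scopeParts := PySem.Chars.splitOn s "::".toList
    let numScopeParts := scopeParts.length
    let numScopeParts :=
      if PySem.Chars.find (PySem.List.pyGetD scopeParts ((scopeParts.length : Int) - 1) [])
           "__anon".toList ≠ -1
      then numScopeParts - 1 else numScopeParts
    let scopeout := FixupScopeLoop scopeParts numScopeParts 0 []
    PySem.Chars.slice scopeout (some 0) (some ((scopeout.length : Int) - 2))

def FixupScope (scope : String) : String := String.ofList (FixupScopeCore scope.toList)

-- ===== PORT B =====
def FixupScopeAltCore (s : List Char) : List Char :=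
  let pos := PySem.Chars.rfind s "::".toList
  if pos = -1 then s
  else if PySem.Chars.isIn "__anon".toList (PySem.Chars.slice s (some (pos + 2)) none) then
    PySem.Chars.slice s none (some pos)
  else s

def FixupScope_alt (scope : String) : String := String.ofList (FixupScopeAltCore scope.toList)

-- ===== PRECONDITION & SPEC =====
-- Pre_ excludes strings containing ":::" (overlapping occurrences of the separator),
-- a malformed scope no caller specifies: A's left-to-right split and B's
-- last-occurrence rfind are two equally defensible readings of the last separator
-- and may pick different boundaries there.
def Pre_FixupScope (scope : String) : Prop :=
  PySem.Chars.isIn ":::".toList scope.toList = false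
instance (scope : String) : Decidable (Pre_FixupScope scope) := by unfold Pre_FixupScope; infer_instance

def pvWitness_FixupScope : String := "ns::cls::__anonNS"

def Spec_FixupScope (scope : String) (out : String) : Prop := out = FixupScope_alt scope
instance (scope : String) (out : String) : Decidable (Spec_FixupScope scope out) := by unfold Spec_FixupScope; infer_instance

-- ===== CLAIM (what is proved, stated in full; the proofs are below) =====
def Claim_equal_FixupScope : Prop := ∀ (scope : String), Dom_FixupScope scope → Pre_FixupScope scope → Spec_FixupScope scope (FixupScope scope)

-- ===== LEMMAS AND PROOFS =====

-- the split-based normal form both ports are reduced to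
def splitForm (s : List Char) : List Char :=
  let parts := PySem.Chars.splitOn s "::".toList
  if 1 < parts.length ∧ PySem.Chars.isIn "__anon".toList (PySem.List.pyGetD parts (-1) []) then
    PySem.Chars.join "::".toList (PySem.List.slice parts none (some (-1)))
  else s

theorem intercalate_snoc (sep y x : List Char) (xs : List (List Char)) :
    List.intercalate sep (x :: xs ++ [y]) = List.intercalate sep (x :: xs) ++ sep ++ y := by
  induction xs generalizing x with
  | nil => simp [List.intercalate]
  | cons a t ih =>
      have h1 : List.intercalate sep (x :: (a :: (t ++ [y]))) =
          x ++ sep ++ List.intercalate sep (a :: (t ++ [y])) := by simp [List.intercalate]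
      have h2 : List.intercalate sep (x :: a :: t) =
          x ++ sep ++ List.intercalate sep (a :: t) := by simp [List.intercalate]
      simp only [List.cons_append] at *
      rw [h1, ih a, h2]; simp

theorem join_snoc (sep y : List Char) (xs : List (List Char)) (h : xs ≠ []) :
    PySem.Chars.join sep (xs ++ [y]) = PySem.Chars.join sep xs ++ sep ++ y := by
  cases xs with
  | nil => exact absurd rfl h
  | cons x t => exact intercalate_snoc sep y x t

-- structure of splitOn.go: length grows past acc
theorem go_len (sep : List Char) (fuel : Nat) : ∀ (l cur : List Char) (acc : List (List Char)),
    acc.length < (PySem.Chars.splitOn.go sep fuel l cur acc).length := by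
  induction fuel with
  | zero => intro l cur acc; show acc.length < (((cur.reverse ++ l) :: acc).reverse).length; simp
  | succ fuel ih =>
      intro l cur acc
      cases l with
      | nil => show acc.length < ((cur.reverse :: acc).reverse).length; simp
      | cons c rest =>
          show acc.length < (if sep.isPrefixOf (c :: rest) then
              PySem.Chars.splitOn.go sep fuel ((c :: rest).drop sep.length) [] (cur.reverse :: acc)
            else PySem.Chars.splitOn.go sep fuel rest (c :: cur) acc).length
          split_ifs with hp
          · have := ih ((c :: rest).drop sep.length) [] (cur.reverse :: acc)
            simp at this; omega
          · exact ih rest (c :: cur) acc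

-- joining the pieces produced by splitOn.go restores acc ++ the unread input
theorem go_join (sep : List Char) (hsep : sep ≠ []) (fuel : Nat) :
    ∀ (l cur : List Char) (acc : List (List Char)), l.length < fuel →
    PySem.Chars.join sep (PySem.Chars.splitOn.go sep fuel l cur acc) =
      PySem.Chars.join sep acc.reverse ++ (if acc = [] then [] else sep) ++ cur.reverse ++ l := by
  induction fuel with
  | zero => intro l cur acc h; omega
  | succ fuel ih =>
      intro l cur acc hlen
      cases l with
      | nil =>
          show PySem.Chars.join sep ((cur.reverse :: acc).reverse) = _
          cases acc with
          | nil => simp [PySem.Chars.join, List.intercalate]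
          | cons a t =>
              rw [List.reverse_cons, join_snoc sep cur.reverse _ (by simp)]
              simp
      | cons c rest =>
          have hsl : 1 ≤ sep.length := List.length_pos_iff.2 hsep
          show PySem.Chars.join sep (if sep.isPrefixOf (c :: rest) then
              PySem.Chars.splitOn.go sep fuel ((c :: rest).drop sep.length) [] (cur.reverse :: acc)
            else PySem.Chars.splitOn.go sep fuel rest (c :: cur) acc) = _
          by_cases hp : sep.isPrefixOf (c :: rest) = true
          · rw [if_pos hp]
            have hdl : ((c :: rest).drop sep.length).length < fuel := by
              simp only [List.length_drop, List.length_cons] at hlen ⊢; omega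
            rw [ih _ [] (cur.reverse :: acc) hdl]
            have hpre : sep ++ (c :: rest).drop sep.length = c :: rest := by
              obtain ⟨t, ht⟩ := (List.isPrefixOf_iff_prefix).1 hp
              rw [← ht]; simp
            set d := (c :: rest).drop sep.length with hd
            rw [← hpre]
            cases acc with
            | nil => simp [PySem.Chars.join, List.intercalate]
            | cons a tl =>
                rw [List.reverse_cons, join_snoc sep cur.reverse _ (by simp)]
                simp
          · rw [if_neg hp]
            rw [ih rest (c :: cur) acc (by simp at hlen ⊢; omega)]
            simp

-- splitOn.go yields exactly acc+1 pieces iff the separator does not occur in the unread input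
theorem go_one (sep : List Char) (hsep : sep ≠ []) (fuel : Nat) :
    ∀ (l cur : List Char) (acc : List (List Char)), l.length < fuel →
    ((PySem.Chars.splitOn.go sep fuel l cur acc).length = acc.length + 1 ↔
      PySem.Chars.isIn sep l = false) := by
  induction fuel with
  | zero => intro l cur acc h; omega
  | succ fuel ih =>
      intro l cur acc hlen
      cases l with
      | nil =>
          show ((cur.reverse :: acc).reverse).length = acc.length + 1 ↔ _
          simp [PySem.Chars.isIn_eq_false_iff]
          intro h
          exact hsep h
      | cons c rest =>
          show (if sep.isPrefixOf (c :: rest) then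
              PySem.Chars.splitOn.go sep fuel ((c :: rest).drop sep.length) [] (cur.reverse :: acc)
            else PySem.Chars.splitOn.go sep fuel rest (c :: cur) acc).length = acc.length + 1 ↔ _
          split_ifs with hp
          · have h1 := go_len sep fuel ((c :: rest).drop sep.length) [] (cur.reverse :: acc)
            simp only [List.length_cons] at h1
            constructor
            · intro h; omega
            · intro h
              rw [PySem.Chars.isIn_eq_false_iff] at h
              exact absurd (((List.isPrefixOf_iff_prefix).1 hp).isInfix) h
          · rw [ih rest (c :: cur) acc (by simp at hlen ⊢; omega)]
            have : PySem.Chars.isIn sep (c :: rest) = PySem.Chars.isIn sep rest := by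
              rcases hbi : PySem.Chars.isIn sep rest with _ | _
              · rw [PySem.Chars.isIn_eq_false_iff] at hbi ⊢
                intro hinf
                rcases List.infix_cons_iff.1 hinf with hpre | hinf'
                · exact hp ((List.isPrefixOf_iff_prefix).2 hpre)
                · exact hbi hinf'
              · rw [PySem.Chars.isIn_iff_infix] at hbi ⊢
                exact hbi.trans (List.suffix_cons c rest).isInfix
            rw [this]

theorem splitOn_join (s : List Char) :
    PySem.Chars.join "::".toList (PySem.Chars.splitOn s "::".toList) = s := by
  have h := go_join "::".toList (by decide) (s.length + 1) s [] [] (by omega)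
  simpa [PySem.Chars.splitOn] using h

theorem splitOn_one_iff (s : List Char) :
    (PySem.Chars.splitOn s "::".toList).length = 1 ↔ PySem.Chars.isIn "::".toList s = false := by
  have h := go_one "::".toList (by decide) (s.length + 1) s [] [] (by omega)
  simpa [PySem.Chars.splitOn] using h

theorem splitOn_len_pos (s : List Char) : 0 < (PySem.Chars.splitOn s "::".toList).length := by
  have h := go_len "::".toList (s.length + 1) s [] []
  simpa [PySem.Chars.splitOn] using h

-- both indexings of the last part coincide on a nonempty list
theorem pyGetD_last_eq {α : Type} (xs : List α) (d : α) (h : xs ≠ []) :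
    PySem.List.pyGetD xs ((xs.length : Int) - 1) d = PySem.List.pyGetD xs (-1) d := by
  have hl : 1 ≤ xs.length := List.length_pos_iff.2 h
  have e1 : PySem.List.pyIdx? xs.length ((xs.length : Int) - 1) = some (xs.length - 1) := by
    simp only [PySem.List.pyIdx?]
    rw [if_pos (by omega : (0 : Int) ≤ (xs.length : Int) - 1),
        if_pos (by omega : (xs.length : Int) - 1 < (xs.length : Int))]
    congr 1; omega
  have e2 : PySem.List.pyIdx? xs.length (-1 : Int) = some (xs.length - 1) := by
    simp only [PySem.List.pyIdx?]
    rw [if_neg (by omega : ¬ (0 : Int) ≤ (-1 : Int)),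
        if_pos (by omega : -(xs.length : Int) ≤ (-1 : Int))]
    congr 1
  simp only [PySem.List.pyGetD, PySem.List.pyGet?, e1, e2]

-- the loop run with numScopeParts = counter + parts.length appends every part plus "::"
theorem loop_all : ∀ (ps : List (List Char)) (c : Nat) (out : List Char),
    FixupScopeLoop ps (c + ps.length) c out = out ++ (ps.map (· ++ "::".toList)).flatten := by
  intro ps
  induction ps with
  | nil => intro c out; simp only [FixupScopeLoop, List.map_nil, List.flatten_nil, List.append_nil]
  | cons p rest ih =>
      intro c out
      show (if c + (p :: rest).length ≤ c + 1 then out ++ p ++ "::".toList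
            else FixupScopeLoop rest (c + (p :: rest).length) (c + 1) (out ++ p ++ "::".toList)) = _
      simp only [List.length_cons]
      split_ifs with hb
      · have : rest = [] := by
          cases rest with | nil => rfl | cons a t => simp at hb
        subst this; simp
      · have hn : c + (rest.length + 1) = (c + 1) + rest.length := by omega
        rw [hn, ih (c + 1) (out ++ p ++ "::".toList)]
        simp

-- the loop run with numScopeParts = counter + parts.length - 1 stops before the last part
theorem loop_drop : ∀ (ps : List (List Char)) (c : Nat) (out : List Char), 2 ≤ ps.length →
    FixupScopeLoop ps (c + ps.length - 1) c out = out ++ (ps.dropLast.map (· ++ "::".toList)).flatten := by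
  intro ps
  induction ps with
  | nil => intro c out h; simp at h
  | cons p rest ih =>
      intro c out hlen
      show (if c + (p :: rest).length - 1 ≤ c + 1 then out ++ p ++ "::".toList
            else FixupScopeLoop rest (c + (p :: rest).length - 1) (c + 1) (out ++ p ++ "::".toList)) = _
      simp only [List.length_cons]
      have hrest : rest ≠ [] := by
        cases rest with | nil => simp at hlen | cons a t => simp
      split_ifs with hb
      · have h1 : rest.length = 1 := by simp at hlen; omega
        obtain ⟨a, ha⟩ : ∃ a, rest = [a] := by
          cases rest with
          | nil => simp at h1
          | cons a t => cases t with | nil => exact ⟨a, rfl⟩ | cons b u => simp at h1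
        subst ha; simp
      · have h2 : 2 ≤ rest.length := by simp at hlen ⊢; omega
        have hn : c + (rest.length + 1) - 1 = (c + 1) + rest.length - 1 := by omega
        rw [hn, ih (c + 1) (out ++ p ++ "::".toList) h2]
        rw [List.dropLast_cons_of_ne_nil hrest]
        simp

theorem flatten_map_sep (ps : List (List Char)) (h : ps ≠ []) :
    (ps.map (· ++ "::".toList)).flatten = PySem.Chars.join "::".toList ps ++ "::".toList := by
  induction ps with
  | nil => exact absurd rfl h
  | cons p rest ih =>
      cases rest with
      | nil => simp [PySem.Chars.join, List.intercalate]
      | cons a t =>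
          rw [List.map_cons, List.flatten_cons, ih (by simp)]
          have : PySem.Chars.join "::".toList (p :: a :: t) =
              p ++ "::".toList ++ PySem.Chars.join "::".toList (a :: t) := by
            simp [PySem.Chars.join, List.intercalate]
          rw [this]; simp

-- scopeout[0:len(scopeout)-2] strips exactly the trailing "::"
theorem slice_strip (x : List Char) :
    PySem.Chars.slice (x ++ "::".toList) (some 0)
      (some (((x ++ "::".toList).length : Int) - 2)) = x := by
  have hlen : (((x ++ "::".toList).length : Int)) - 2 = ((x.length : Nat) : Int) := by
    simp only [List.length_append]
    have h2 : ("::".toList).length = 2 := rfl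
    rw [h2]; push_cast; ring
  rw [PySem.Chars.slice_eq_listSlice, hlen, PySem.List.slice_zero_start,
      PySem.List.slice_to_natCast]
  simp

-- A reduces to the split-based normal form (on every input)
theorem A_eq_splitForm (s : List Char) : FixupScopeCore s = splitForm s := by
  by_cases hfind : PySem.Chars.find s "::".toList = -1
  · have hone : (PySem.Chars.splitOn s "::".toList).length = 1 := by
      rw [splitOn_one_iff, PySem.Chars.isIn_eq_false_iff]
      exact (PySem.Chars.find_eq_neg_one_iff s "::".toList).1 hfind
    simp only [FixupScopeCore, splitForm]
    rw [if_pos hfind,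
        if_neg (by intro hc; rw [hone] at hc; exact absurd hc.1 (by omega))]
  · have hin : PySem.Chars.isIn "::".toList s = true := by
      rw [PySem.Chars.isIn_iff_infix]
      exact (PySem.Chars.find_ne_neg_one_iff s "::".toList).1 hfind
    have hne1 : (PySem.Chars.splitOn s "::".toList).length ≠ 1 := by
      intro h; rw [splitOn_one_iff s] at h; rw [hin] at h; cases h
    have hpos := splitOn_len_pos s
    set parts := PySem.Chars.splitOn s "::".toList with hparts
    have h2 : 2 ≤ parts.length := by omega
    have hnn : parts ≠ [] := by
      intro h; rw [h] at hpos; simp at hpos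
    have hlastidx := pyGetD_last_eq parts ([] : List Char) hnn
    by_cases hanon : PySem.Chars.find (PySem.List.pyGetD parts ((parts.length : Int) - 1) []) "__anon".toList = -1
    · have hBfalse : PySem.Chars.isIn "__anon".toList (PySem.List.pyGetD parts (-1) []) = false := by
        rw [← hlastidx, PySem.Chars.isIn_eq_false_iff]
        exact (PySem.Chars.find_eq_neg_one_iff _ _).1 hanon
      have hA : FixupScopeCore s = s := by
        simp only [FixupScopeCore]
        rw [if_neg hfind, ← hparts, if_neg (not_not_intro hanon)]
        have hl := loop_all parts 0 []
        simp only [Nat.zero_add] at hl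
        rw [hl, List.nil_append, flatten_map_sep parts hnn, slice_strip, hparts]
        exact splitOn_join s
      rw [hA]
      simp only [splitForm]
      rw [← hparts,
          if_neg (by intro hc; rw [hBfalse] at hc; exact Bool.false_ne_true hc.2)]
    · have hBtrue : PySem.Chars.isIn "__anon".toList (PySem.List.pyGetD parts (-1) []) = true := by
        rw [← hlastidx, PySem.Chars.isIn_iff_infix]
        exact (PySem.Chars.find_ne_neg_one_iff _ _).1 hanon
      have hdnn : parts.dropLast ≠ [] := by
        have hld : parts.dropLast.length = parts.length - 1 := by simp
        intro h; rw [h] at hld; simp at hld; omega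
      have hA : FixupScopeCore s = PySem.Chars.join "::".toList parts.dropLast := by
        simp only [FixupScopeCore]
        rw [if_neg hfind, ← hparts, if_pos hanon]
        have hl := loop_drop parts 0 [] h2
        simp only [Nat.zero_add] at hl
        rw [hl, List.nil_append, flatten_map_sep parts.dropLast hdnn, slice_strip]
      rw [hA]
      simp only [splitForm]
      rw [← hparts, if_pos ⟨by omega, hBtrue⟩,
          PySem.List.slice_to_neg_one]

-- ===== rfind characterisation =====
theorem rfind_go_spec (s sub : List Char) : ∀ k : Nat,
    (PySem.Chars.rfind.go s sub k = -1 ∧ ∀ j ≤ k, ¬ sub <+: s.drop j) ∨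
    (∃ p : Nat, PySem.Chars.rfind.go s sub k = (p : Int) ∧ p ≤ k ∧ sub <+: s.drop p ∧
      ∀ j, p < j → j ≤ k → ¬ sub <+: s.drop j) := by
  intro k
  induction k with
  | zero =>
      by_cases hp : sub.isPrefixOf s = true
      · right
        refine ⟨0, ?_, le_refl 0, by simpa using (List.isPrefixOf_iff_prefix).1 hp, ?_⟩
        · simp [PySem.Chars.rfind.go, hp]
        · intro j hj hj0; omega
      · left
        constructor
        · simp [PySem.Chars.rfind.go, hp]
        · intro j hj
          interval_cases j
          simpa using fun h => hp ((List.isPrefixOf_iff_prefix).2 h)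
  | succ k ih =>
      by_cases hp : sub.isPrefixOf (s.drop (k + 1)) = true
      · right
        refine ⟨k + 1, ?_, le_refl _, (List.isPrefixOf_iff_prefix).1 hp, ?_⟩
        · simp [PySem.Chars.rfind.go, hp]
        · intro j hj hj'; omega
      · have hgo : PySem.Chars.rfind.go s sub (k + 1) = PySem.Chars.rfind.go s sub k := by
          simp [PySem.Chars.rfind.go, hp]
        have hknot : ¬ sub <+: s.drop (k + 1) := fun h => hp ((List.isPrefixOf_iff_prefix).2 h)
        rcases ih with ⟨he, hall⟩ | ⟨p, he, hpk, hpre, hmax⟩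
        · left
          refine ⟨by rw [hgo]; exact he, ?_⟩
          intro j hj
          rcases Nat.lt_or_ge j (k + 1) with h | h
          · exact hall j (by omega)
          · have : j = k + 1 := by omega
            subst this; exact hknot
        · right
          refine ⟨p, by rw [hgo]; exact he, by omega, hpre, ?_⟩
          intro j hj hj'
          rcases Nat.lt_or_ge j (k + 1) with h | h
          · exact hmax j hj (by omega)
          · have : j = k + 1 := by omega
            subst this; exact hknot

theorem rfind_eq_neg_one_iff (s : List Char) :
    PySem.Chars.rfind s "::".toList = -1 ↔ ¬ ("::".toList <:+: s) := by
  rcases rfind_go_spec s "::".toList s.length with ⟨he, hall⟩ | ⟨p, he, _, hpre, _⟩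
  · constructor
    · intro _ hinf
      obtain ⟨j, hj⟩ := (PySem.Chars.exists_prefix_drop_iff_isIn "::".toList s).mpr
        ((PySem.Chars.isIn_iff_infix _ _).2 hinf)
      have hjle : j ≤ s.length := by
        by_contra h
        have : s.drop j = [] := List.drop_eq_nil_of_le (by omega)
        rw [this] at hj
        exact absurd (List.prefix_nil.1 hj) (by decide)
      exact hall j hjle hj
    · intro _; exact he
  · constructor
    · intro h
      rw [PySem.Chars.rfind] at h
      rw [he] at h; omega
    · intro hinf
      exact absurd (hpre.isInfix.trans (List.drop_suffix p s).isInfix) hinf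

theorem rfind_pos_spec (s : List Char) (hinf : "::".toList <:+: s) :
    ∃ p : Nat, PySem.Chars.rfind s "::".toList = (p : Int) ∧
      "::".toList <+: s.drop p ∧ ∀ j, p < j → ¬ "::".toList <+: s.drop j := by
  rcases rfind_go_spec s "::".toList s.length with ⟨he, _⟩ | ⟨p, he, _, hpre, hmax⟩
  · exact absurd hinf ((rfind_eq_neg_one_iff s).1 he)
  · refine ⟨p, he, hpre, ?_⟩
    intro j hj hpj
    rcases Nat.lt_or_ge s.length j with h | h
    · have : s.drop j = [] := List.drop_eq_nil_of_le (by omega)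
      rw [this] at hpj
      exact absurd (List.prefix_nil.1 hpj) (by decide)
    · exact hmax j hj h hpj

-- [x, y] infix of a snoc: inside, or ending at the last position
theorem infix_pair_snoc (x y c : Char) (w : List Char)
    (h : [x, y] <:+: (w ++ [c])) :
    [x, y] <:+: w ∨ (c = y ∧ w.getLast? = some x) := by
  rcases h with ⟨u, v, huv⟩
  rcases List.eq_nil_or_concat v with hv | ⟨v', d, hv⟩
  · subst hv
    right
    have huv' : (u ++ [x]) ++ [y] = w ++ [c] := by
      simpa [List.append_assoc] using huv
    obtain ⟨hw, hy⟩ := List.append_singleton_inj.mp huv'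
    exact ⟨hy.symm, by rw [← hw]; simp⟩
  · rw [List.concat_eq_append] at hv
    subst hv
    left
    have huv' : (u ++ [x, y] ++ v') ++ [d] = w ++ [c] := by
      simpa [List.append_assoc] using huv
    obtain ⟨hw, _⟩ := List.append_singleton_inj.mp huv'
    exact ⟨u, v', hw⟩

-- last piece of splitOn.go carries no separator
theorem go_last (fuel : Nat) : ∀ (l cur : List Char) (acc : List (List Char)),
    l.length < fuel →
    ¬ ("::".toList <:+: cur.reverse) →
    (cur.head? = some ':' → l.head? ≠ some ':') →
    ∃ piece, (PySem.Chars.splitOn.go "::".toList fuel l cur acc).getLast? = some piece ∧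
      ¬ ("::".toList <:+: piece) := by
  induction fuel with
  | zero => intro l cur acc h; omega
  | succ fuel ih =>
      intro l cur acc hlen hcur hbd
      cases l with
      | nil =>
          refine ⟨cur.reverse, ?_, hcur⟩
          show ((cur.reverse :: acc).reverse).getLast? = some cur.reverse
          simp [List.getLast?_reverse]
      | cons c rest =>
          show ∃ piece, (if "::".toList.isPrefixOf (c :: rest) then
              PySem.Chars.splitOn.go "::".toList fuel ((c :: rest).drop "::".toList.length) []
                (cur.reverse :: acc)
            else PySem.Chars.splitOn.go "::".toList fuel rest (c :: cur) acc).getLast? = some piece ∧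
            ¬ ("::".toList <:+: piece)
          by_cases hp : "::".toList.isPrefixOf (c :: rest) = true
          · rw [if_pos hp]
            refine ih _ [] (cur.reverse :: acc) ?_ (by decide) (by simp)
            simp at hlen ⊢; omega
          · rw [if_neg hp]
            refine ih rest (c :: cur) acc (by simp at hlen ⊢; omega) ?_ ?_
            · rw [List.reverse_cons]
              intro hinf
              rcases infix_pair_snoc ':' ':' c cur.reverse hinf with h | ⟨hc, hl⟩
              · exact hcur h
              · subst hc
                have hh : cur.head? = some ':' := by
                  rw [← List.getLast?_reverse]; exact hl
                have := hbd hh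
                simp at this
            · intro hh hr
              apply hp
              have hc : c = ':' := by simpa using hh
              have : ∃ r', rest = ':' :: r' := by
                cases rest with
                | nil => simp at hr
                | cons d r' =>
                    have hd : d = ':' := by simpa using hr
                    exact ⟨r', by rw [hd]⟩
              obtain ⟨r', hr'⟩ := this
              subst hc; subst hr'
              simp [List.isPrefixOf]

-- `a ++ "::" ++ b` with no "::" in b and no ":::" anywhere determines a (and hence b)
theorem sep_decomp_unique : ∀ (a1 a2 b1 b2 : List Char),
    a1 ++ ':' :: ':' :: b1 = a2 ++ ':' :: ':' :: b2 →
    ¬ ("::".toList <:+: b1) → ¬ ("::".toList <:+: b2) →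
    ¬ (":::".toList <:+: (a1 ++ ':' :: ':' :: b1)) →
    a1 = a2 := by
  intro a1
  induction a1 with
  | nil =>
      intro a2 b1 b2 heq h1 h2 h3
      cases a2 with
      | nil => rfl
      | cons x y =>
          simp only [List.nil_append, List.cons_append] at heq
          obtain ⟨hx, htl⟩ := List.cons.injEq ':' (':' :: b1) x (y ++ ':' :: ':' :: b2) ▸ heq
          have hx' : x = ':' := hx.symm
          cases y with
          | nil =>
              simp only [List.nil_append] at htl
              obtain ⟨_, hb⟩ := List.cons.injEq ':' b1 ':' (':' :: b2) ▸ htl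
              exfalso
              apply h3
              refine ⟨[], b2, ?_⟩
              simp [hb]
          | cons z w =>
              simp only [List.cons_append] at htl
              obtain ⟨hz, hb⟩ := List.cons.injEq ':' b1 z (w ++ ':' :: ':' :: b2) ▸ htl
              exfalso
              apply h1
              exact ⟨w, b2, by rw [hb]; simp⟩
  | cons x a1' ih =>
      intro a2 b1 b2 heq h1 h2 h3
      cases a2 with
      | nil =>
          simp only [List.cons_append, List.nil_append] at heq
          obtain ⟨hx, htl⟩ := List.cons.injEq x (a1' ++ ':' :: ':' :: b1) ':' (':' :: b2) ▸ heq
          cases a1' with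
          | nil =>
              exfalso
              apply h3
              simp only [List.nil_append] at htl
              refine ⟨[], b1, ?_⟩
              simp [hx]
          | cons z w =>
              simp only [List.cons_append] at htl
              obtain ⟨hz, hb⟩ := List.cons.injEq z (w ++ ':' :: ':' :: b1) ':' b2 ▸ htl
              exfalso
              apply h2
              exact ⟨w, b1, by rw [← hb]; simp⟩
      | cons y a2' =>
          simp only [List.cons_append] at heq
          obtain ⟨hxy, htl⟩ := List.cons.injEq x (a1' ++ ':' :: ':' :: b1) y (a2' ++ ':' :: ':' :: b2) ▸ heq
          have h3' : ¬ (":::".toList <:+: (a1' ++ ':' :: ':' :: b1)) := by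
            intro h
            exact h3 (h.trans (List.suffix_cons x _).isInfix)
          rw [hxy, ih a2' b1 b2 htl h1 h2 h3']

theorem pyGetD_neg_one_concat {α : Type} (L : List α) (y : α) (d : α) :
    PySem.List.pyGetD (L ++ [y]) (-1) d = y := by
  have hlen : (L ++ [y]).length = L.length + 1 := by simp
  have e : PySem.List.pyIdx? (L ++ [y]).length (-1 : Int) = some L.length := by
    simp only [PySem.List.pyIdx?, hlen]
    rw [if_neg (by omega : ¬ (0 : Int) ≤ (-1 : Int)),
        if_pos (by push_cast; omega : -((L.length + 1 : Nat) : Int) ≤ (-1 : Int))]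
    simp
  simp only [PySem.List.pyGetD, PySem.List.pyGet?, e]
  simp

-- B reduces to the same split-based normal form, given no ":::"
theorem B_eq_splitForm (s : List Char) (hpre : ¬ (":::".toList <:+: s)) :
    FixupScopeAltCore s = splitForm s := by
  by_cases hinf : "::".toList <:+: s
  · obtain ⟨p, hrf, hpfx, hmax⟩ := rfind_pos_spec s hinf
    obtain ⟨b, hb⟩ := hpfx
    have hbdrop : b = s.drop (p + 2) := by
      have h2 := congrArg (List.drop 2) hb
      simpa [List.drop_drop, Nat.add_comm] using h2
    have hs : s = s.take p ++ ':' :: ':' :: b := by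
      have h1 := (List.take_append_drop p s).symm
      rw [← hb] at h1
      simpa using h1
    -- no "::" in b
    have hbno : ¬ ("::".toList <:+: b) := by
      intro hbi
      obtain ⟨j, hj⟩ := (PySem.Chars.exists_prefix_drop_iff_isIn "::".toList b).mpr
        ((PySem.Chars.isIn_iff_infix _ _).2 hbi)
      have : "::".toList <+: s.drop (p + 2 + j) := by
        rw [← List.drop_drop, ← hbdrop]
        exact hj
      exact hmax (p + 2 + j) (by omega) this
    -- parts of the split
    have hin : PySem.Chars.isIn "::".toList s = true := (PySem.Chars.isIn_iff_infix _ _).2 hinf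
    have hne1 : (PySem.Chars.splitOn s "::".toList).length ≠ 1 := by
      intro h; rw [splitOn_one_iff s] at h; rw [hin] at h; cases h
    have hposl := splitOn_len_pos s
    set parts := PySem.Chars.splitOn s "::".toList with hparts
    have hnn : parts ≠ [] := by intro h; rw [h] at hposl; simp at hposl
    obtain ⟨lastp, hlast, hlastno⟩ :
        ∃ piece, parts.getLast? = some piece ∧ ¬ ("::".toList <:+: piece) := by
      have := go_last (s.length + 1) s [] [] (by omega) (by decide) (by simp)
      simpa [hparts, PySem.Chars.splitOn] using this
    obtain ⟨L, hL⟩ : ∃ L, parts = L ++ [lastp] := by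
      rcases List.eq_nil_or_concat parts with h | ⟨L, y, h⟩
      · exact absurd h hnn
      · rw [List.concat_eq_append] at h
        refine ⟨L, ?_⟩
        rw [h]
        have : y = lastp := by
          have := hlast
          rw [h, List.getLast?_concat] at this
          injection this
        rw [this]
    have hLnn : L ≠ [] := by
      intro h
      apply hne1
      rw [hL, h]; simp
    have hjoin : PySem.Chars.join "::".toList L ++ ':' :: ':' :: lastp = s := by
      have h1 := splitOn_join s
      rw [← hparts] at h1
      rw [hL, join_snoc _ _ _ hLnn] at h1
      simpa [List.append_assoc] using h1
    -- uniqueness: L's join = take p, lastp = b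
    have hjno : ¬ ("::".toList <:+: b) := hbno
    have heq2 : PySem.Chars.join "::".toList L ++ ':' :: ':' :: lastp
        = s.take p ++ ':' :: ':' :: b := by rw [hjoin, ← hs]
    have hpre' : ¬ (":::".toList <:+: (PySem.Chars.join "::".toList L ++ ':' :: ':' :: lastp)) := by
      rw [hjoin]; exact hpre
    have ha : PySem.Chars.join "::".toList L = s.take p :=
      sep_decomp_unique _ _ _ _ heq2 hlastno hbno hpre'
    have hblast : lastp = b := by
      have h0 := heq2
      rw [ha] at h0
      have h2 := List.append_cancel_left h0
      simpa using h2
    -- evaluate both sides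
    have hrfne : PySem.Chars.rfind s "::".toList ≠ -1 := by rw [hrf]; omega
    have hslice_from : PySem.Chars.slice s (some ((p : Int) + 2)) none = b := by
      rw [PySem.Chars.slice_eq_listSlice]
      have : ((p : Int) + 2) = ((p + 2 : Nat) : Int) := by push_cast; ring
      rw [this, PySem.List.slice_from_natCast, hbdrop]
    have hslice_to : PySem.Chars.slice s none (some (p : Int)) = s.take p := by
      rw [PySem.Chars.slice_eq_listSlice, PySem.List.slice_to_natCast]
    simp only [FixupScopeAltCore, splitForm]
    rw [if_neg (by rw [hrf]; omega : ¬ PySem.Chars.rfind s "::".toList = -1)]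
    rw [hrf, hslice_from]
    rw [← hparts]
    have hlen2 : 1 < parts.length := by omega
    have hget : PySem.List.pyGetD parts (-1) ([] : List Char) = lastp := by
      rw [hL]; exact pyGetD_neg_one_concat L lastp []
    by_cases hmem : PySem.Chars.isIn "__anon".toList b = true
    · rw [if_pos hmem, if_pos ⟨hlen2, by rw [hget, hblast]; exact hmem⟩]
      rw [PySem.List.slice_to_neg_one, hslice_to, hL, List.dropLast_concat, ha]
    · rw [if_neg hmem, if_neg (by
        intro hc
        rw [hget, hblast] at hc
        exact hmem hc.2)]
  · -- no "::" anywhere: both sides return s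
    have hrf : PySem.Chars.rfind s "::".toList = -1 := (rfind_eq_neg_one_iff s).2 hinf
    have hone : (PySem.Chars.splitOn s "::".toList).length = 1 := by
      rw [splitOn_one_iff, PySem.Chars.isIn_eq_false_iff]
      exact hinf
    simp only [FixupScopeAltCore, splitForm]
    rw [if_pos hrf, if_neg (by intro hc; rw [hone] at hc; exact absurd hc.1 (by omega))]

-- ===== VERDICT (by name: the statement is the Claim_ definition above) =====
theorem FixupScope_spec : Claim_equal_FixupScope := by
  intro scope _ hpre
  show FixupScope scope = FixupScope_alt scope
  unfold FixupScope FixupScope_alt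
  rw [A_eq_splitForm, B_eq_splitForm]
  rw [← PySem.Chars.isIn_eq_false_iff]
  exact hpre
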